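-- pv_equiv track=rewrite | github.com/assadAllah630/vocab-web | server/api/ai_gateway/adapters/cohere.py | _format_messages_cohere
-- ===== SOURCE A (Python) =====
-- from typing import Optional, Dict, Any, List
--
-- def _format_messages_cohere(messages: List[Dict[str, str]]) -> tuple:
--     preamble, chat_history, current_message = "", [], ""
--     for i, msg in enumerate(messages):
--         role, content = msg.get("role", "user"), msg.get("content", "")
--         if role == "system":
--             preamble = content
--         elif i == len(messages) - 1 and role == "user":
--             current_message = content
--         else:
--             chat_history.append({"role": "CHATBOT" if role == "assistant" else "USER", "message": content})
--     if not current_message and messages: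
--         current_message = messages[-1].get("content", "")
--     return preamble, current_message, chat_history
-- ===== SOURCE B (Python) =====
-- def _format_messages_cohere(messages):
--     if not messages:
--         return "", "", []
--     *init, last = messages
--
--     def fmt(m):
--         return {"role": "CHATBOT" if m.get("role", "user") == "assistant" else "USER",
--                 "message": m.get("content", "")}
--
--     preamble = next((m.get("content", "") for m in reversed(messages)
--                      if m.get("role", "user") == "system"), "")
--     history = [fmt(m) for m in init if m.get("role", "user") != "system"]
--     last_role = last.get("role", "user")
--     if last_role not in ("system", "user"):
--         history.append(fmt(last))
--     return preamble, last.get("content", ""), history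
-- ===== Notes on version B (the rewrite author's own statement) =====
-- stated objective: simpler
-- what changed: Replaces the single positional enumerate loop (with its post-loop current_message fixup) by three independent computations: preamble as a reverse scan for the last system message, current_message directly as the last message's content, and chat_history as a filtered map over messages[:-1] plus a single last-element rule.
import Mathlib
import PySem

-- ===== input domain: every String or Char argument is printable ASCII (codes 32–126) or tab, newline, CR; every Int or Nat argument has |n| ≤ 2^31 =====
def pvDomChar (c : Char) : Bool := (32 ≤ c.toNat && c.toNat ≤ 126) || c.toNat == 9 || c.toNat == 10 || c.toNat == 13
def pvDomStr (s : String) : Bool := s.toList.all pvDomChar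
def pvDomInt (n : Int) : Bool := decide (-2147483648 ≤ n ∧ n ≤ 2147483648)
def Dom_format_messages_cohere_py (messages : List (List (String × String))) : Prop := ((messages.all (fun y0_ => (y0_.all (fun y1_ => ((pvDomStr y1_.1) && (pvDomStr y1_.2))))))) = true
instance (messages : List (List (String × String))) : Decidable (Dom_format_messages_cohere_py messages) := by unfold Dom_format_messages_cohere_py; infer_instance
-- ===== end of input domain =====

-- B recomputes the same triple in three independent passes (reverse scan for the preamble,
-- direct last-content for current_message, filtered map over messages[:-1] for the history)
-- instead of A's single positional enumerate loop with a post-loop fixup; objective: simpler.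

-- ===== PORT A =====
-- msg.get(k, d) on a dict modelled as an association list (first match)
def pvGetA (m : List (String × String)) (k d : String) : String :=
  match m.find? (fun p => p.1 == k) with
  | some p => p.2
  | none => d

def format_messages_cohere_py (messages : List (List (String × String))) : String × String × (List (List (String × String))) :=
  let res := (PySem.List.enumerate messages 0).foldl
    (fun (acc : String × List (List (String × String)) × String) im =>
      let role := pvGetA im.2 "role" "user"
      let content := pvGetA im.2 "content" ""
      if role == "system" then (content, acc.2.1, acc.2.2)
      else if im.1 == (messages.length : Int) - 1 && role == "user" then (acc.1, acc.2.1, content)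
      else (acc.1, acc.2.1 ++ [[("role", if role == "assistant" then "CHATBOT" else "USER"), ("message", content)]], acc.2.2))
    ("", [], "")
  let current := if res.2.2 == "" && !messages.isEmpty then
      pvGetA (PySem.List.pyGetD messages (-1) []) "content" "" else res.2.2
  (res.1, current, res.2.1)

-- ===== PORT B =====
def pvGetB (m : List (String × String)) (k d : String) : String :=
  (List.lookup k m).getD d

def pvFmtB (m : List (String × String)) : List (String × String) :=
  [("role", if pvGetB m "role" "user" == "assistant" then "CHATBOT" else "USER"),
   ("message", pvGetB m "content" "")]

def format_messages_cohere_py_alt (messages : List (List (String × String))) : String × String × (List (List (String × String))) :=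
  match messages.getLast? with
  | none => ("", "", [])
  | some last =>
    let preamble := ((messages.reverse.find? (fun m => pvGetB m "role" "user" == "system")).map
        (fun m => pvGetB m "content" "")).getD ""
    let history := (messages.dropLast.filter (fun m => pvGetB m "role" "user" != "system")).map pvFmtB
    let lr := pvGetB last "role" "user"
    let history := if lr != "system" && lr != "user" then history ++ [pvFmtB last] else history
    (preamble, pvGetB last "content" "", history)

-- ===== PRECONDITION & SPEC =====
def Spec_format_messages_cohere_py (messages : List (List (String × String))) (out : String × String × (List (List (String × String)))) : Prop := out = format_messages_cohere_py_alt messages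
instance (messages : List (List (String × String))) (out : String × String × (List (List (String × String)))) : Decidable (Spec_format_messages_cohere_py messages out) := by unfold Spec_format_messages_cohere_py; infer_instance

-- ===== CLAIM (what is proved, stated in full; the proofs are below) =====
def Claim_equal_format_messages_cohere_py : Prop := ∀ (messages : List (List (String × String))), Dom_format_messages_cohere_py messages → Spec_format_messages_cohere_py messages (format_messages_cohere_py messages)

-- ===== LEMMAS AND PROOFS =====


-- proof-only helpers: the index-free body of A's loop, and the running preamble
def pvFmtA (m : List (String × String)) : List (String × String) :=
  [("role", if pvGetA m "role" "user" == "assistant" then "CHATBOT" else "USER"),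
   ("message", pvGetA m "content" "")]

def pvStep (acc : String × List (List (String × String)) × String)
    (m : List (String × String)) : String × List (List (String × String)) × String :=
  if pvGetA m "role" "user" == "system" then (pvGetA m "content" "", acc.2.1, acc.2.2)
  else (acc.1, acc.2.1 ++ [pvFmtA m], acc.2.2)

def pvPre : List (List (String × String)) → String → String
  | [], p => p
  | m :: t, p => pvPre t (if pvGetA m "role" "user" == "system" then pvGetA m "content" "" else p)

theorem pvGetB_eq (m : List (String × String)) (k d : String) : pvGetB m k d = pvGetA m k d := by
  induction m with
  | nil => rfl
  | cons x t ih =>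
    obtain ⟨a, b⟩ := x
    by_cases h : k = a
    · simp [pvGetB, pvGetA, List.lookup, h]
    · have hb : (k == a) = false := by simp [h]
      simp only [pvGetB, pvGetA, List.lookup, hb] at *
      simpa [beq_iff_eq, Ne.symm h] using ih

theorem pvFmtB_eq (m : List (String × String)) : pvFmtB m = pvFmtA m := by
  simp [pvFmtB, pvFmtA, pvGetB_eq]

theorem foldA (N : Int) (l : List (List (String × String))) :
    ∀ (s : Int) (acc : String × List (List (String × String)) × String),
    s + l.length < N →
    (PySem.List.enumerate l s).foldl
      (fun acc im =>
        if (pvGetA im.2 "role" "user" == "system") then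
          (pvGetA im.2 "content" "", acc.2.1, acc.2.2)
        else if (im.1 == N - 1 && pvGetA im.2 "role" "user" == "user") then
          (acc.1, acc.2.1, pvGetA im.2 "content" "")
        else
          (acc.1, acc.2.1 ++ [[("role", if pvGetA im.2 "role" "user" == "assistant" then "CHATBOT" else "USER"), ("message", pvGetA im.2 "content" "")]], acc.2.2)) acc
    = l.foldl pvStep acc := by
  induction l with
  | nil => intro s acc _; rw [PySem.List.enumerate_nil]; rfl
  | cons x t ih =>
    intro s acc hlt
    rw [PySem.List.enumerate_cons, List.foldl_cons, List.foldl_cons]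
    have hne : (s == N - 1) = false := by
      simp only [List.length_cons] at hlt
      simp only [beq_eq_false_iff_ne]
      omega
    rw [ih (s + 1) _ (by simp only [List.length_cons] at hlt; omega)]
    congr 1
    by_cases hs : pvGetA x "role" "user" = "system"
    · simp [pvStep, hs]
    · simp [pvStep, pvFmtA, hs, hne]

theorem foldStep (l : List (List (String × String))) (p : String)
    (h : List (List (String × String))) (c : String) :
    l.foldl pvStep (p, h, c) =
      (pvPre l p, h ++ (l.filter (fun m => !(pvGetA m "role" "user" == "system"))).map pvFmtA, c) := by
  induction l generalizing p h with
  | nil => simp [pvPre]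
  | cons m t ih =>
    by_cases hs : pvGetA m "role" "user" = "system"
    · simp [pvStep, pvPre, hs, ih]
    · simp [pvStep, pvPre, hs, ih]

theorem pvPre_eq (l : List (List (String × String))) (p : String) :
    pvPre l p = ((l.reverse.find? (fun m => pvGetA m "role" "user" == "system")).map
      (fun m => pvGetA m "content" "")).getD p := by
  induction l generalizing p with
  | nil => simp [pvPre]
  | cons m t ih =>
    rw [pvPre, ih]
    simp only [List.reverse_cons, List.find?_append]
    cases hf : t.reverse.find? (fun m => pvGetA m "role" "user" == "system") with
    | some x => simp [Option.or]
    | none =>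
      by_cases hs : pvGetA m "role" "user" = "system"
      · simp [Option.or, List.find?, hs]
      · have hb : (pvGetA m "role" "user" == "system") = false := by simp [hs]
        simp [Option.or, List.find?, hb]

-- ===== VERDICT (by name: the statement is the Claim_ definition above) =====
theorem format_messages_cohere_py_spec : Claim_equal_format_messages_cohere_py := by
  intro messages _
  unfold Spec_format_messages_cohere_py
  rcases List.eq_nil_or_concat messages with rfl | ⟨l, last, rfl⟩
  · rfl
  · rw [List.concat_eq_append]
    unfold format_messages_cohere_py format_messages_cohere_py_alt
    rw [PySem.List.enumerate_append, List.foldl_append]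
    rw [foldA ((l ++ [last]).length : Int) l 0 _ (by simp)]
    rw [foldStep]
    rw [PySem.List.enumerate_cons, PySem.List.enumerate_nil]
    simp only [List.foldl_cons, List.foldl_nil]
    rw [List.getLast?_concat, List.dropLast_concat]
    have hlast : PySem.List.pyGetD (l ++ [last]) (-1) ([] : List (String × String)) = last :=
      PySem.List.pyGetD_neg_one_append_singleton ..
    simp only [pvGetB_eq, pvFmtB_eq, pvPre_eq, List.reverse_append, List.reverse_cons,
      List.reverse_nil, List.nil_append, List.singleton_append, List.find?_cons]
    by_cases hs : pvGetA last "role" "user" = "system"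
    · simp [hs, hlast, bne, pvFmtB_eq]
    · have hb : (pvGetA last "role" "user" == "system") = false := by simp [hs]
      by_cases hu : pvGetA last "role" "user" = "user"
      · simp [hu, hlast, bne, pvFmtB_eq]
      · simp [hb, hu, hlast, bne, pvFmtB_eq, pvFmtA]
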